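-- pv_equiv track=rewrite | github.com/i-dubits/ya_training | Train_4.0/4. Brut_force/C. Максимальный разрез_2.py | find_max_weight_distribution_with_bitmask
-- ===== SOURCE A (Python) =====
-- def calculate_edge_weight_with_bitmask(adj_list, bitmask):
--     total_weight = 0
--     N = len(adj_list)
--     for u in range(N):
--         if bitmask & (1 << u):
--             for v, weight in adj_list[u]:
--                 if not (bitmask & (1 << v)):
--                     total_weight += weight
--     return total_weight
--
-- def find_max_weight_distribution_with_bitmask(N, adj_list):
--     max_weight = 0
--     best_bitmask = 0
--     for bitmask in range(1, 1 << N):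
--         weight = calculate_edge_weight_with_bitmask(adj_list, bitmask)
--         if weight > max_weight:
--             max_weight = weight
--             best_bitmask = bitmask
--     return max_weight, best_bitmask
-- ===== SOURCE B (Python) =====
-- def _toggle(adj_list, rev, mask, weight, u):
--     # Flip vertex u in/out of the current set, updating the cut weight incrementally:
--     # only edges incident to u (out via adj_list[u], in via rev[u]) are touched.
--     bit = 1 << u
--     inside = mask & bit
--     mw = mask if inside else mask + bit   # mask with u inside
--     mo = mask - bit if inside else mask   # mask with u outside
--     s_out = 0
--     if u < len(adj_list):
--         for v, w in adj_list[u]: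
--             if not (mw & (1 << v)):
--                 s_out += w
--     s_in = 0
--     for x, w in rev.get(u, []):
--         if mo & (1 << x):
--             s_in += w
--     if inside:
--         return mo, weight - s_out + s_in
--     else:
--         return mw, weight + s_out - s_in
--
-- def _build_rev(adj_list, L):
--     # reverse-adjacency index: rev[v] = list of (u, w) edges u -> v with u < L
--     rev = {}
--     for u in range(L):
--         for v, w in adj_list[u]:
--             rev.setdefault(v, []).append((u, w))
--     return rev
--
-- def find_max_weight_distribution_with_bitmask(N, adj_list):
--     # Enumerate bitmasks 1..2^N-1 in the same (numeric) order as the brute force, but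
--     # maintain the cut weight incrementally: going from m-1 to m flips only the trailing
--     # bits of m (amortised O(1) flips per step), each flip touching O(deg(u)) edges.
--     rev = _build_rev(adj_list, min(N, len(adj_list)))
--     mask = 0
--     weight = 0
--     max_weight = 0
--     best_bitmask = 0
--     for m in range(1, 1 << N):
--         k = (m ^ (m - 1)).bit_length() - 1   # lowest set bit of m
--         for j in range(k):
--             mask, weight = _toggle(adj_list, rev, mask, weight, j)
--         mask, weight = _toggle(adj_list, rev, mask, weight, k)
--         if weight > max_weight:
--             max_weight = weight
--             best_bitmask = m
--     return max_weight, best_bitmask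
-- ===== Notes on version B (the rewrite author's own statement) =====
-- stated objective: alternative
-- what changed: Instead of recomputing the whole cut weight from scratch for each of the 2^N-1 bitmasks, B precomputes a reverse-adjacency index once and enumerates the bitmasks in the same numeric order while updating the cut weight incrementally per bit flip (amortised O(1) flips per mask, each flip touching only the edges incident to the flipped vertex).
-- outside the precondition, e.g. on find_max_weight_distribution_with_bitmask(-1, []): A raises ValueError, B raises ValueError; on find_max_weight_distribution_with_bitmask(2, [[(-1, 5)]]): A raises ValueError, B raises ValueError
import Mathlib
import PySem

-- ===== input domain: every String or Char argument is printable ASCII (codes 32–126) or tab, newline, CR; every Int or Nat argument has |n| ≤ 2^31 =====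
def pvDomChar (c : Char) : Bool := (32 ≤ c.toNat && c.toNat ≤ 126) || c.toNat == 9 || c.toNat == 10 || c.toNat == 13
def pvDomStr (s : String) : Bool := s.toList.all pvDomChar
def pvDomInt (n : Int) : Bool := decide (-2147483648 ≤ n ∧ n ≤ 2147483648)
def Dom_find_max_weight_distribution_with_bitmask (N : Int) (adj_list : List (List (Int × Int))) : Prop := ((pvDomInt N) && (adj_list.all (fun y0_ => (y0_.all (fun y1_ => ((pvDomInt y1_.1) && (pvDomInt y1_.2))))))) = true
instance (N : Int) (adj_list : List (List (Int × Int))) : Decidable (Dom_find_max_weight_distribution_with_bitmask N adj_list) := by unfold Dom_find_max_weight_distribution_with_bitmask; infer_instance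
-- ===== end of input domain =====

-- B replaces A's per-mask recomputation of the cut weight by numeric-order enumeration with
-- incremental per-bit-flip updates through a precomputed reverse-adjacency index (alternative
-- algorithm; O(deg) work per bit flip instead of a full O(N+E) rescan per mask).

-- ===== PORT A =====
-- 1 << u for 0 ≤ u (Python raises on u < 0; such inputs are outside Pre_)
def pvPow (u : Int) : Int := 2 ^ u.toNat

def calculate_edge_weight_with_bitmask (adj_list : List (List (Int × Int))) (bitmask : Int) : Int :=
  (PySem.List.pyRange 0 (adj_list.length : Int) 1).foldl (fun total_weight u =>
    if PySem.Int.band bitmask (pvPow u) ≠ 0 then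
      (PySem.List.pyGetD adj_list u []).foldl (fun tw vw =>
        if ¬ (PySem.Int.band bitmask (pvPow vw.1) ≠ 0) then tw + vw.2 else tw) total_weight
    else total_weight) 0

def find_max_weight_distribution_with_bitmask (N : Int) (adj_list : List (List (Int × Int))) : Int × Int :=
  (PySem.List.pyRange 1 (pvPow N) 1).foldl (fun st bitmask =>
    let weight := calculate_edge_weight_with_bitmask adj_list bitmask
    if weight > st.1 then (weight, bitmask) else st) (0, 0)

-- ===== PORT B =====
-- 1 << u for 0 ≤ u, as used by Source B (Python raises on u < 0; outside Pre_)
def pvShl (u : Int) : Int := 2 ^ u.toNat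

-- _build_rev from Source B: reverse-adjacency index rev[v] = [(u, w) : edge u -> v, u < L]
def pvRev (adj_list : List (List (Int × Int))) (L : Int) : PySem.Dict Int (List (Int × Int)) :=
  (PySem.List.pyRange 0 L 1).foldl (fun d u =>
      (PySem.List.pyGetD adj_list u []).foldl (fun d vw =>
        d.modify vw.1 [] (fun l => l ++ [(u, vw.2)])) d) PySem.Dict.empty

-- _toggle from Source B: flip vertex u, updating the cut weight from edges incident to u only
def pvToggle (adj_list : List (List (Int × Int))) (rev : PySem.Dict Int (List (Int × Int)))
    (mask weight u : Int) : Int × Int :=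
  let bit := pvShl u
  let inside := PySem.Int.band mask bit
  let mw := if inside ≠ 0 then mask else mask + bit
  let mo := if inside ≠ 0 then mask - bit else mask
  let s_out :=
    if u < (adj_list.length : Int) then
      (PySem.List.pyGetD adj_list u []).foldl (fun s vw =>
        if ¬ (PySem.Int.band mw (pvShl vw.1) ≠ 0) then s + vw.2 else s) 0
    else 0
  let s_in := (rev.getD u []).foldl (fun s xw =>
      if PySem.Int.band mo (pvShl xw.1) ≠ 0 then s + xw.2 else s) 0
  if inside ≠ 0 then (mo, weight - s_out + s_in) else (mw, weight + s_out - s_in)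

def find_max_weight_distribution_with_bitmask_alt (N : Int) (adj_list : List (List (Int × Int))) : Int × Int :=
  let rev := pvRev adj_list (min N (adj_list.length : Int))
  let r := (PySem.List.pyRange 1 (pvShl N) 1).foldl (fun st m =>
      let k := (PySem.Int.bitLength (PySem.Int.bxor m (m - 1)) : Int) - 1
      let mw1 := (PySem.List.pyRange 0 k 1).foldl (fun p j => pvToggle adj_list rev p.1 p.2 j) st.1
      let p := pvToggle adj_list rev mw1.1 mw1.2 k
      if p.2 > st.2.1 then (p, (p.2, m)) else (p, st.2)) ((0, 0), (0, 0))
  r.2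

-- ===== PRECONDITION & SPEC =====
-- Pre_ excludes exactly the inputs on which the Python A raises a ValueError in `1 << v`:
-- N < 0, or a negative target vertex v in a row u < min(N, len(adj_list)) that A reaches.
def Pre_find_max_weight_distribution_with_bitmask (N : Int) (adj_list : List (List (Int × Int))) : Prop :=
  0 ≤ N ∧ ∀ u ∈ List.range ((min N (adj_list.length : Int)).toNat),
    ∀ vw ∈ adj_list.getD u [], 0 ≤ vw.1
instance (N : Int) (adj_list : List (List (Int × Int))) : Decidable (Pre_find_max_weight_distribution_with_bitmask N adj_list) := by unfold Pre_find_max_weight_distribution_with_bitmask; infer_instance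

def pvWitness_find_max_weight_distribution_with_bitmask : Int × (List (List (Int × Int))) :=
  (2, [[(1, 5)], [(0, -2)]])

def Spec_find_max_weight_distribution_with_bitmask (N : Int) (adj_list : List (List (Int × Int))) (out : Int × Int) : Prop := out = find_max_weight_distribution_with_bitmask_alt N adj_list
instance (N : Int) (adj_list : List (List (Int × Int))) (out : Int × Int) : Decidable (Spec_find_max_weight_distribution_with_bitmask N adj_list out) := by unfold Spec_find_max_weight_distribution_with_bitmask; infer_instance

def Claim_equal_find_max_weight_distribution_with_bitmask : Prop := ∀ (N : Int) (adj_list : List (List (Int × Int))), Dom_find_max_weight_distribution_with_bitmask N adj_list → Pre_find_max_weight_distribution_with_bitmask N adj_list → Spec_find_max_weight_distribution_with_bitmask N adj_list (find_max_weight_distribution_with_bitmask N adj_list)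


-- ===== proof-side specs =====
def pvRowS (row : List (Int × Int)) (s : Nat) : Int :=
  (row.map (fun vw => if s.testBit vw.1.toNat then 0 else vw.2)).sum

def pvW (adj : List (List (Int × Int))) (s : Nat) : Int :=
  ((List.range adj.length).map (fun u => if s.testBit u then pvRowS (adj.getD u []) s else 0)).sum

lemma pvShl_eq_pvPow (u : Int) : pvShl u = pvPow u := rfl

lemma band_pvPow_ne (s : Nat) (v : Int) :
    (PySem.Int.band (s : Int) (pvPow v) ≠ 0) ↔ s.testBit v.toNat = true := by
  have h : pvPow v = ((2 ^ v.toNat : Nat) : Int) := by simp [pvPow]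
  rw [h, PySem.Int.band_natCast]
  rw [Nat.and_two_pow]
  cases hb : s.testBit v.toNat <;> simp [hb]

lemma rowS_foldl (row : List (Int × Int)) (s : Nat) (a : Int) :
    row.foldl (fun tw vw => if ¬ s.testBit vw.1.toNat then tw + vw.2 else tw) a
      = a + pvRowS row s := by
  induction row generalizing a with
  | nil => simp [pvRowS]
  | cons x xs ih =>
    simp only [List.foldl_cons, ih, pvRowS, List.map_cons, List.sum_cons]
    by_cases hb : s.testBit x.1.toNat <;> simp [hb, pvRowS] <;> ring

lemma calcA_eq (adj : List (List (Int × Int))) (s : Nat) :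
    calculate_edge_weight_with_bitmask adj ((s : Nat) : Int) = pvW adj s := by
  unfold calculate_edge_weight_with_bitmask
  rw [PySem.List.pyRange_zero_nat, List.foldl_map]
  have hcongr : ∀ (a : Int) (u : Nat), u ∈ List.range adj.length →
      (fun (total_weight : Int) (u : Nat) =>
        if PySem.Int.band ↑s (pvPow ↑u) ≠ 0 then
          (PySem.List.pyGetD adj ↑u []).foldl (fun tw vw =>
            if ¬ (PySem.Int.band ↑s (pvPow vw.1) ≠ 0) then tw + vw.2 else tw) total_weight
        else total_weight) a u
      = a + (if s.testBit u then pvRowS (adj.getD u []) s else 0) := by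
    intro a u _
    simp only [PySem.List.pyGetD_natCast, band_pvPow_ne, Int.toNat_natCast]
    by_cases hb : s.testBit u
    · simp only [hb, if_pos, if_true]
      rw [rowS_foldl]
    · simp [hb]
  refine (PySem.List.foldl_congr_mem _ _ _ _ hcongr).trans ?_
  rw [PySem.List.foldl_add]
  simp [pvW]

def pvTgt (adj : List (List (Int × Int))) (Λ : Nat) (k : Int) : List (Int × Int) :=
  (List.range Λ).flatMap (fun u =>
    ((adj.getD u []).filter (fun vw => vw.1 == k)).map (fun vw => ((u : Int), vw.2)))

lemma row_modify_getD (row : List (Int × Int)) (u : Int)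
    (d : PySem.Dict Int (List (Int × Int))) (c : Int) :
    (row.foldl (fun d vw => d.modify vw.1 [] (fun l => l ++ [(u, vw.2)])) d).getD c []
      = d.getD c [] ++ ((row.filter (fun vw => vw.1 == c)).map (fun vw => (u, vw.2))) := by
  have h : row.foldl (fun d vw => d.modify vw.1 [] (fun l => l ++ [(u, vw.2)])) d
      = (row.map (fun vw => (vw.1, (u, vw.2)))).foldl
          (fun d p => d.modify p.1 [] (fun l => l ++ [p.2])) d := by
    rw [List.foldl_map]
  rw [h, PySem.Dict.getD_foldl_modify_append, List.filter_map, List.map_map]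
  rfl

lemma pvRev_getD (adj : List (List (Int × Int))) (Λ : Nat) (c : Int) :
    (pvRev adj (Λ : Int)).getD c [] = pvTgt adj Λ c := by
  unfold pvRev
  rw [PySem.List.pyRange_zero_nat, List.foldl_map]
  induction Λ with
  | zero => simp [pvTgt, PySem.Dict.getD_empty]
  | succ n ih =>
    rw [List.range_succ, List.foldl_append, List.foldl_cons, List.foldl_nil]
    rw [row_modify_getD]
    rw [ih]
    simp only [pvTgt, List.range_succ, List.flatMap_append, List.flatMap_cons, List.flatMap_nil,
      List.append_nil, PySem.List.pyGetD_natCast]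

-- ===== Nat bit facts =====
lemma pv_div_decomp (x d q r : Nat) (hd : 0 < d) (hx : x = d * q + r) (hr : r < d) :
    x / d = q := by
  subst hx
  rw [Nat.mul_add_div hd, Nat.div_eq_of_lt hr]
  omega

lemma pv_testBit_decomp (x j q r : Nat) (hx : x = 2 ^ j * q + r) (hr : r < 2 ^ j) :
    x.testBit j = decide (q % 2 = 1) := by
  rw [Nat.testBit_eq_decide_div_mod_eq, pv_div_decomp x (2 ^ j) q r (by positivity) hx hr]

lemma pv_testBit_high (x y d i : Nat) (hq : x / 2 ^ d = y / 2 ^ d) :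
    x.testBit (d + i) = y.testBit (d + i) := by
  rw [← Nat.testBit_shiftRight, ← Nat.testBit_shiftRight,
    Nat.shiftRight_eq_div_pow, Nat.shiftRight_eq_div_pow, hq]

lemma pv_testBit_add_pow (s k j : Nat) (h : s.testBit k = false) :
    (s + 2 ^ k).testBit j = ((j == k) || s.testBit j) := by
  rcases Nat.lt_trichotomy j k with hj | rfl | hj
  · rw [Nat.add_comm, Nat.testBit_two_pow_add_gt hj]
    simp [Nat.ne_of_lt hj]
  · rw [Nat.add_comm, Nat.testBit_two_pow_add_eq, h]; simp
  · -- j > k : the high bits are unchanged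
    have hrlt : s % 2 ^ (k + 1) < 2 ^ k := by
      have h1 : s % 2 ^ (k + 1) < 2 ^ (k + 1) :=
        Nat.mod_lt _ (by positivity)
      have h2 : (s % 2 ^ (k + 1)).testBit k = false := by
        rw [Nat.testBit_mod_two_pow]; simp [h]
      by_contra hc
      have hge : 2 ^ k ≤ s % 2 ^ (k + 1) := by omega
      have := pv_testBit_decomp (s % 2 ^ (k + 1)) k 1 (s % 2 ^ (k + 1) - 2 ^ k)
        (by omega) (by omega)
      rw [h2] at this
      simp at this
    obtain ⟨i, rfl⟩ : ∃ i, j = (k + 1) + i := ⟨j - (k + 1), by omega⟩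
    have hne : (k + 1 + i == k) = false := by simp; omega
    rw [hne, Bool.false_or]
    apply pv_testBit_high _ _ (k+1) i
    have hdm := Nat.div_add_mod s (2 ^ (k + 1))
    have hp : 2 ^ (k + 1) = 2 * 2 ^ k := by ring
    rw [pv_div_decomp (s + 2 ^ k) (2 ^ (k + 1)) (s / 2 ^ (k + 1)) (s % 2 ^ (k + 1) + 2 ^ k)
      (by positivity) (by omega) (by omega)]

-- every positive t is (odd)·2^k : t = 2^(k+1)·b + 2^k
lemma pv_ctz_ex (t : Nat) (ht : 1 ≤ t) : ∃ k b, t = 2 ^ (k + 1) * b + 2 ^ k := by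
  induction t using Nat.strong_induction_on with
  | _ t ih =>
    rcases Nat.even_or_odd t with he | ho
    · obtain ⟨c, hc⟩ := he
      have hc1 : 1 ≤ c := by omega
      obtain ⟨k, b, hkb⟩ := ih c (by omega) hc1
      exact ⟨k + 1, b, by subst hc hkb; ring⟩
    · obtain ⟨c, hc⟩ := ho
      exact ⟨0, c, by omega⟩

lemma pv_testBit_t (k b j : Nat) (hj : j ≤ k) :
    (2 ^ (k + 1) * b + 2 ^ k).testBit j = decide (j = k) := by
  have h1 : 2 ^ (k + 1) * b + 2 ^ k = 2 ^ j * (2 ^ (k + 1 - j) * b + 2 ^ (k - j)) + 0 := by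
    have e1 : j + (k + 1 - j) = k + 1 := by omega
    have e2 : j + (k - j) = k := by omega
    rw [Nat.mul_add, ← Nat.mul_assoc, ← Nat.pow_add, ← Nat.pow_add, e1, e2]
    omega
  rw [pv_testBit_decomp _ j _ 0 h1 (by positivity)]
  rcases Nat.lt_or_ge j k with hlt | hge
  · have e1 : 2 ^ (k + 1 - j) = 2 * 2 ^ (k - j) := by rw [← Nat.pow_succ']; congr 1; omega
    have e2 : 2 ^ (k - j) = 2 * 2 ^ (k - j - 1) := by rw [← Nat.pow_succ']; congr 1; omega
    simp only [e1, e2]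
    have hpar : (2 * (2 * 2 ^ (k - j - 1)) * b + 2 * 2 ^ (k - j - 1)) % 2 = 0 := by
      rw [show 2 * (2 * 2 ^ (k - j - 1)) * b + 2 * 2 ^ (k - j - 1)
        = 2 * (2 * 2 ^ (k - j - 1) * b + 2 ^ (k - j - 1)) from by ring]
      omega
    simp [hpar, Nat.ne_of_lt hlt]
  · have hjk : j = k := by omega
    rw [hjk, show k + 1 - k = 1 from by omega, show k - k = 0 from by omega]
    have hpar : (2 ^ 1 * b + 2 ^ 0) % 2 = 1 := by simp only [pow_one, pow_zero]; omega
    simp [hpar]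

lemma pv_testBit_tm1 (k b j : Nat) (hj : j ≤ k) :
    (2 ^ (k + 1) * b + (2 ^ k - 1)).testBit j = decide (j < k) := by
  have hjle : 2 ^ j ≤ 2 ^ k := Nat.pow_le_pow_right (by norm_num) hj
  have h1 : 2 ^ (k + 1) * b + (2 ^ k - 1)
      = 2 ^ j * (2 ^ (k + 1 - j) * b + (2 ^ (k - j) - 1)) + (2 ^ j - 1) := by
    have e3 : 2 ^ j * (2 ^ (k - j) - 1) = 2 ^ k - 2 ^ j := by
      have e2 : j + (k - j) = k := by omega
      rw [Nat.mul_sub, ← Nat.pow_add, e2]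
      omega
    have e4 : j + (k + 1 - j) = k + 1 := by omega
    rw [Nat.mul_add, ← Nat.mul_assoc, ← Nat.pow_add, e3, e4]
    have h5 : (1:Nat) ≤ 2 ^ j := Nat.one_le_two_pow
    omega
  have h2 : (0:Nat) < 2 ^ j := by positivity
  rw [pv_testBit_decomp _ j _ _ h1 (by omega)]
  rcases Nat.lt_or_ge j k with hlt | hge
  · have e1 : 2 ^ (k + 1 - j) = 2 * 2 ^ (k - j) := by rw [← Nat.pow_succ']; congr 1; omega
    have e2 : 2 ^ (k - j) = 2 * 2 ^ (k - j - 1) := by rw [← Nat.pow_succ']; congr 1; omega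
    have h3 : (0:Nat) < 2 ^ (k - j - 1) := by positivity
    simp only [e1, e2]
    have hpar : (2 * (2 * 2 ^ (k - j - 1)) * b + (2 * 2 ^ (k - j - 1) - 1)) % 2 = 1 := by
      rw [show 2 * (2 * 2 ^ (k - j - 1)) * b = 2 * (2 * 2 ^ (k - j - 1) * b) from by ring]
      have h4 : (1:Nat) ≤ 2 ^ (k - j - 1) := Nat.one_le_two_pow
      omega
    simp [hpar, hlt]
  · have hjk : j = k := by omega
    rw [hjk, show k + 1 - k = 1 from by omega, show k - k = 0 from by omega]
    have hpar : (2 ^ 1 * b + (2 ^ 0 - 1)) % 2 = 0 := by simp only [pow_one, pow_zero]; omega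
    simp [hpar]

lemma pv_xor_tm1 (k b : Nat) :
    (2 ^ (k + 1) * b + 2 ^ k) ^^^ (2 ^ (k + 1) * b + 2 ^ k - 1) = 2 ^ (k + 1) - 1 := by
  have hk : (1:Nat) ≤ 2 ^ k := Nat.one_le_two_pow
  have hm1 : 2 ^ (k + 1) * b + 2 ^ k - 1 = 2 ^ (k + 1) * b + (2 ^ k - 1) := by omega
  apply Nat.eq_of_testBit_eq
  intro j
  rw [Nat.testBit_xor, Nat.testBit_two_pow_sub_one, hm1]
  rcases Nat.lt_or_ge j (k + 1) with hlt | hge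
  · have hj : j ≤ k := by omega
    rw [pv_testBit_t k b j hj, pv_testBit_tm1 k b j hj]
    rcases Nat.lt_or_ge j k with h2 | h2
    · simp [h2, Nat.ne_of_lt h2]
      omega
    · have : j = k := by omega
      simp [this, hlt]
  · obtain ⟨i, rfl⟩ : ∃ i, j = (k + 1) + i := ⟨j - (k + 1), by omega⟩
    have hq : (2 ^ (k + 1) * b + 2 ^ k) / 2 ^ (k + 1) = (2 ^ (k + 1) * b + (2 ^ k - 1)) / 2 ^ (k + 1) := by
      rw [pv_div_decomp _ _ b (2 ^ k) (by positivity) rfl (by rw [Nat.pow_succ]; omega),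
          pv_div_decomp _ _ b (2 ^ k - 1) (by positivity) rfl (by rw [Nat.pow_succ]; omega)]
    rw [pv_testBit_high _ _ (k + 1) i hq]
    simp
    omega

-- ===== flip mathematics =====
def pvRowK (row : List (Int × Int)) (k : Nat) : Int :=
  (row.map (fun vw => if vw.1.toNat = k then vw.2 else 0)).sum

def pvInS (entries : List (Int × Int)) (s : Nat) : Int :=
  (entries.map (fun xw => if s.testBit xw.1.toNat then xw.2 else 0)).sum

lemma pvRowS_insert (row : List (Int × Int)) (s k : Nat) (hk : s.testBit k = false) :
    pvRowS row (s + 2 ^ k) = pvRowS row s - pvRowK row k := by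
  induction row with
  | nil => simp [pvRowS, pvRowK]
  | cons x xs ih =>
    simp only [pvRowS, pvRowK, List.map_cons, List.sum_cons] at *
    rw [pv_testBit_add_pow s k x.1.toNat hk]
    by_cases hv : x.1.toNat = k
    · subst hv
      simp [hk]
      omega
    · simp only [beq_iff_eq, hv, if_false, Bool.false_or,
        show (x.1.toNat == k) = false from by simp [hv]]
      by_cases hb : s.testBit x.1.toNat <;> simp [hb] <;> omega

lemma pv_sum3 (l : List Nat) (f g h e : Nat → Int) (hpt : ∀ u ∈ l, f u = g u + h u - e u) :
    (l.map f).sum = (l.map g).sum + (l.map h).sum - (l.map e).sum := by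
  induction l with
  | nil => simp
  | cons a l ih =>
    simp only [List.map_cons, List.sum_cons]
    rw [hpt a (by simp), ih (fun u hu => hpt u (by simp [hu]))]
    ring

lemma pv_sum_ite_eq (n k : Nat) (X : Nat → Int) :
    ((List.range n).map (fun u => if u = k then X u else 0)).sum
      = if k < n then X k else 0 := by
  induction n with
  | zero => simp
  | succ n ih =>
    rw [List.range_succ, List.map_append, List.sum_append, ih]
    by_cases h : n = k
    · subst h
      simp [Nat.lt_irrefl, Nat.lt_succ_self]
    · by_cases h2 : k < n <;> simp [h, h2] <;> omega

lemma pv_bit_lt (s n u : Nat) (hs : s < 2 ^ n) (hu : s.testBit u = true) : u < n := by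
  by_contra hc
  have : s < 2 ^ u := lt_of_lt_of_le hs (Nat.pow_le_pow_right (by norm_num) (by omega))
  rw [Nat.testBit_eq_false_of_lt this] at hu
  exact Bool.false_ne_true hu

lemma pvW_insert (adj : List (List (Int × Int))) (s k : Nat) (hbit : s.testBit k = false) :
    pvW adj (s + 2 ^ k) = pvW adj s + pvRowS (adj.getD k []) (s + 2 ^ k)
      - ((List.range adj.length).map
          (fun u => if s.testBit u then pvRowK (adj.getD u []) k else 0)).sum := by
  have hpt : ∀ u ∈ List.range adj.length,
      (fun u => if (s + 2 ^ k).testBit u then pvRowS (adj.getD u []) (s + 2 ^ k) else 0) u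
        = (fun u => if s.testBit u then pvRowS (adj.getD u []) s else 0) u
          + (fun u => if u = k then pvRowS (adj.getD u []) (s + 2 ^ k) else 0) u
          - (fun u => if s.testBit u then pvRowK (adj.getD u []) k else 0) u := by
    intro u _
    simp only
    rw [pv_testBit_add_pow s k u hbit]
    by_cases hu : u = k
    · subst hu
      simp [hbit]
    · simp only [show (u == k) = false from by simp [hu], Bool.false_or, hu, if_false]
      by_cases hb : s.testBit u
      · simp [hb, pvRowS_insert _ s k hbit]
      · simp [hb]
  have h1 := pv_sum3 (List.range adj.length) _ _ _ _ hpt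
  simp only [pvW]
  rw [h1, pv_sum_ite_eq]
  by_cases hkM : k < adj.length
  · simp [hkM]
  · have : adj.getD k [] = [] := List.getD_eq_default _ _ (by omega)
    simp [hkM, this, pvRowS]

lemma pv_sum_flatMap {α β : Type} (l : List α) (g : α → List β) (f : β → Int) :
    ((l.flatMap g).map f).sum = (l.map (fun a => ((g a).map f).sum)).sum := by
  induction l with
  | nil => simp
  | cons a l ih => simp [List.flatMap_cons, List.map_append, List.sum_append, ih]

lemma pv_row_filter_sum (row : List (Int × Int)) (k : Nat)
    (hrow : ∀ vw ∈ row, 0 ≤ vw.1) :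
    ((row.filter (fun vw => vw.1 == (k : Int))).map (fun vw => vw.2)).sum
      = pvRowK row k := by
  induction row with
  | nil => simp [pvRowK]
  | cons x xs ih =>
    have hx : 0 ≤ x.1 := hrow x (by simp)
    have ihx := ih (fun vw hvw => hrow vw (by simp [hvw]))
    by_cases he : x.1 = (k : Int)
    · have : x.1.toNat = k := by omega
      simp [pvRowK, List.filter_cons, he, this, List.map_cons, List.sum_cons] at *
      omega
    · have : ¬ x.1.toNat = k := by omega
      simp [pvRowK, List.filter_cons, he, this, List.map_cons, List.sum_cons] at *
      omega

lemma pv_sum_range_restrict (L M : Nat) (hL : L ≤ M) (F : Nat → Int)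
    (h0 : ∀ u, L ≤ u → u < M → F u = 0) :
    ((List.range M).map F).sum = ((List.range L).map F).sum := by
  obtain ⟨r, rfl⟩ : ∃ r, M = L + r := ⟨M - L, by omega⟩
  rw [List.range_add, List.map_append, List.sum_append]
  have hz : ((List.range r).map (fun x => L + x)).map F
      = List.map (fun _ => (0:Int)) ((List.range r).map (fun x => L + x)) := by
    apply List.map_congr_left
    intro u hu
    simp only [List.mem_map, List.mem_range] at hu
    obtain ⟨i, hi, rfl⟩ := hu
    exact h0 _ (by omega) (by omega)
  rw [hz]
  simp [List.map_map, Function.comp_def]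

lemma pv_inS_tgt (adj : List (List (Int × Int))) (Nn s k : Nat)
    (hs : s < 2 ^ Nn)
    (hP : ∀ u ∈ List.range (min Nn adj.length), ∀ vw ∈ adj.getD u [], 0 ≤ vw.1) :
    pvInS (pvTgt adj (min Nn adj.length) (k : Int)) s
      = ((List.range adj.length).map
          (fun u => if s.testBit u then pvRowK (adj.getD u []) k else 0)).sum := by
  unfold pvInS pvTgt
  rw [pv_sum_flatMap]
  have hpt : ∀ u ∈ List.range (min Nn adj.length),
      (fun u => ((((adj.getD u []).filter (fun vw => vw.1 == (k:Int))).map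
          (fun vw => ((u : Int), vw.2))).map
            (fun xw => if s.testBit xw.1.toNat then xw.2 else 0)).sum) u
        = (fun u => if s.testBit u then pvRowK (adj.getD u []) k else 0) u := by
    intro u hu
    simp only [List.map_map, Function.comp_def, Int.toNat_natCast]
    by_cases hb : s.testBit u
    · simp only [hb, if_true]
      rw [← pv_row_filter_sum (adj.getD u []) k (hP u hu)]
    · simp [hb]
  rw [List.map_congr_left hpt]
  refine (pv_sum_range_restrict (min Nn adj.length) adj.length (by omega) _ ?_).symm
  intro u hu1 hu2
  have hnot : s.testBit u = false := by
    by_cases hcase : Nn ≤ adj.length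
    · cases hb : s.testBit u
      · rfl
      · exact absurd (pv_bit_lt s Nn _ hs hb) (by omega)
    · omega
  simp [hnot]

-- ===== mod/testBit helpers =====
lemma pv_testBit_iff_mod (s k : Nat) : s.testBit k = decide (2 ^ k ≤ s % 2 ^ (k + 1)) := by
  have hd := Nat.div_add_mod s (2 ^ (k + 1))
  have hr : s % 2 ^ (k + 1) < 2 ^ (k + 1) := Nat.mod_lt _ (by positivity)
  have hb : s.testBit k = (s % 2 ^ (k + 1)).testBit k := by
    rw [Nat.testBit_mod_two_pow]
    simp
  rw [hb]
  have hp : 2 ^ (k + 1) = 2 * 2 ^ k := by ring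
  rcases Nat.lt_or_ge (s % 2 ^ (k + 1)) (2 ^ k) with hlt | hge
  · rw [pv_testBit_decomp _ k 0 (s % 2 ^ (k + 1)) (by omega) hlt]
    simp
    omega
  · rw [pv_testBit_decomp _ k 1 (s % 2 ^ (k + 1) - 2 ^ k) (by omega) (by omega)]
    simp
    omega

lemma pv_remove (s k : Nat) (h : s.testBit k = true) :
    2 ^ k ≤ s ∧ (s - 2 ^ k).testBit k = false := by
  have hmod := pv_testBit_iff_mod s k
  rw [h] at hmod
  have hge : 2 ^ k ≤ s % 2 ^ (k + 1) := by
    by_contra hc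
    simp [show ¬ (2 ^ k ≤ s % 2 ^ (k+1)) from hc] at hmod
  have hd := Nat.div_add_mod s (2 ^ (k + 1))
  have hr : s % 2 ^ (k + 1) < 2 ^ (k + 1) := Nat.mod_lt _ (by positivity)
  have hp : 2 ^ (k + 1) = 2 * 2 ^ k := by ring
  constructor
  · omega
  · rw [pv_testBit_decomp (s - 2 ^ k) k (2 * (s / 2 ^ (k + 1))) (s % 2 ^ (k + 1) - 2 ^ k)
      (by rw [show 2 ^ k * (2 * (s / 2 ^ (k + 1))) = 2 ^ (k + 1) * (s / 2 ^ (k + 1)) from by rw [hp]; ring]; omega) (by omega)]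
    simp

lemma pvPow_natCast (k : Nat) : pvPow (k : Int) = ((2 ^ k : Nat) : Int) := by simp [pvPow]

lemma inS_foldl (entries : List (Int × Int)) (s : Nat) (a : Int) :
    entries.foldl (fun acc xw => if s.testBit xw.1.toNat then acc + xw.2 else acc) a
      = a + pvInS entries s := by
  induction entries generalizing a with
  | nil => simp [pvInS]
  | cons x xs ih =>
    simp only [List.foldl_cons, ih, pvInS, List.map_cons, List.sum_cons]
    by_cases hb : s.testBit x.1.toNat <;> simp [hb, pvInS] <;> ring

lemma pvToggle_insert (adj : List (List (Int × Int))) (Nn s k : Nat) (w : Int)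
    (hs : s < 2 ^ Nn)
    (hP : ∀ u ∈ List.range (min Nn adj.length), ∀ vw ∈ adj.getD u [], 0 ≤ vw.1)
    (hbit : s.testBit k = false) :
    pvToggle adj (pvRev adj ((min Nn adj.length : Nat) : Int)) ((s : Nat) : Int) w (k : Int)
      = (((s + 2 ^ k : Nat) : Int), w + (pvW adj (s + 2 ^ k) - pvW adj s)) := by
  have hc : ¬ (PySem.Int.band (s : Int) (pvPow (k : Int)) ≠ 0) := by
    simp only [band_pvPow_ne, Int.toNat_natCast, hbit]
    simp
  have hmw : (s : Int) + pvPow (k : Int) = ((s + 2 ^ k : Nat) : Int) := by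
    rw [pvPow_natCast]; push_cast; ring
  simp only [pvToggle, pvShl_eq_pvPow, if_neg hc, hmw]
  have hout : (if (k : Int) < (adj.length : Int) then
      (PySem.List.pyGetD adj (k : Int) []).foldl (fun s' vw =>
        if ¬ (PySem.Int.band ((s + 2 ^ k : Nat) : Int) (pvPow vw.1) ≠ 0) then s' + vw.2 else s') 0
      else 0) = pvRowS (adj.getD k []) (s + 2 ^ k) := by
    by_cases hkM : k < adj.length
    · rw [if_pos (by exact_mod_cast hkM)]
      simp only [band_pvPow_ne, PySem.List.pyGetD_natCast]
      rw [rowS_foldl]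
      ring
    · rw [if_neg (by exact_mod_cast hkM)]
      rw [List.getD_eq_default _ _ (by omega)]
      simp [pvRowS]
  rw [hout]
  have hin : ((pvRev adj ((min Nn adj.length : Nat) : Int)).getD (k : Int) []).foldl
      (fun s' xw => if PySem.Int.band ((s : Nat) : Int) (pvPow xw.1) ≠ 0 then s' + xw.2 else s') 0
      = pvInS (pvTgt adj (min Nn adj.length) (k : Int)) s := by
    rw [pvRev_getD]
    simp only [band_pvPow_ne]
    rw [inS_foldl]
    ring
  rw [hin]
  rw [pvW_insert adj s k hbit, pv_inS_tgt adj Nn s k hs hP]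
  rw [Prod.mk.injEq]
  exact ⟨rfl, by ring⟩

lemma pvToggle_remove (adj : List (List (Int × Int))) (Nn s k : Nat) (w : Int)
    (hs : s < 2 ^ Nn)
    (hP : ∀ u ∈ List.range (min Nn adj.length), ∀ vw ∈ adj.getD u [], 0 ≤ vw.1)
    (hbit : s.testBit k = true) :
    pvToggle adj (pvRev adj ((min Nn adj.length : Nat) : Int)) ((s : Nat) : Int) w (k : Int)
      = (((s - 2 ^ k : Nat) : Int), w + (pvW adj (s - 2 ^ k) - pvW adj s)) := by
  obtain ⟨hle, hbit0⟩ := pv_remove s k hbit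
  have hs0 : s - 2 ^ k < 2 ^ Nn := lt_of_le_of_lt (Nat.sub_le _ _) hs
  have heq : s - 2 ^ k + 2 ^ k = s := by omega
  have hc : (PySem.Int.band (s : Int) (pvPow (k : Int)) ≠ 0) := by
    simp only [band_pvPow_ne, Int.toNat_natCast]
    exact hbit
  have hmo : (s : Int) - pvPow (k : Int) = ((s - 2 ^ k : Nat) : Int) := by
    rw [pvPow_natCast]
    omega
  simp only [pvToggle, pvShl_eq_pvPow, if_pos hc, hmo]
  have hout : (if (k : Int) < (adj.length : Int) then
      (PySem.List.pyGetD adj (k : Int) []).foldl (fun s' vw =>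
        if ¬ (PySem.Int.band ((s : Nat) : Int) (pvPow vw.1) ≠ 0) then s' + vw.2 else s') 0
      else 0) = pvRowS (adj.getD k []) s := by
    by_cases hkM : k < adj.length
    · rw [if_pos (by exact_mod_cast hkM)]
      simp only [band_pvPow_ne, PySem.List.pyGetD_natCast]
      rw [rowS_foldl]
      ring
    · rw [if_neg (by exact_mod_cast hkM)]
      rw [List.getD_eq_default _ _ (by omega)]
      simp [pvRowS]
  rw [hout]
  have hin : ((pvRev adj ((min Nn adj.length : Nat) : Int)).getD (k : Int) []).foldl
      (fun s' xw => if PySem.Int.band (((s - 2 ^ k : Nat) : Nat) : Int) (pvPow xw.1) ≠ 0 then s' + xw.2 else s') 0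
      = pvInS (pvTgt adj (min Nn adj.length) (k : Int)) (s - 2 ^ k) := by
    rw [pvRev_getD]
    simp only [band_pvPow_ne]
    rw [inS_foldl]
    ring
  rw [hin]
  have hW := pvW_insert adj (s - 2 ^ k) k hbit0
  rw [heq] at hW
  rw [Prod.mk.injEq]
  refine ⟨rfl, ?_⟩
  rw [pv_inS_tgt adj Nn (s - 2 ^ k) k hs0 hP, hW]
  ring

lemma pv_testBit_mid (k b j : Nat) (hj : j < k) :
    (2 ^ (k + 1) * b + 2 ^ k - 2 ^ j).testBit j = true := by
  have hjk : 2 ^ j ≤ 2 ^ k := Nat.pow_le_pow_right (by norm_num) (by omega)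
  have h1 : 2 ^ (k + 1) * b + 2 ^ k - 2 ^ j
      = 2 ^ j * (2 ^ (k + 1 - j) * b + (2 ^ (k - j) - 1)) + 0 := by
    have e3 : 2 ^ j * (2 ^ (k - j) - 1) = 2 ^ k - 2 ^ j := by
      have e2 : j + (k - j) = k := by omega
      rw [Nat.mul_sub, ← Nat.pow_add, e2]
      omega
    have e4 : j + (k + 1 - j) = k + 1 := by omega
    rw [Nat.mul_add, ← Nat.mul_assoc, ← Nat.pow_add, e3, e4]
    omega
  rw [pv_testBit_decomp _ j _ 0 h1 (by positivity)]
  have e1 : 2 ^ (k + 1 - j) = 2 * 2 ^ (k - j) := by rw [← Nat.pow_succ']; congr 1; omega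
  have e2 : 2 ^ (k - j) = 2 * 2 ^ (k - j - 1) := by rw [← Nat.pow_succ']; congr 1; omega
  simp only [e1, e2]
  have hpar : (2 * (2 * 2 ^ (k - j - 1)) * b + (2 * 2 ^ (k - j - 1) - 1)) % 2 = 1 := by
    rw [show 2 * (2 * 2 ^ (k - j - 1)) * b = 2 * (2 * 2 ^ (k - j - 1) * b) from by ring]
    have h4 : (1:Nat) ≤ 2 ^ (k - j - 1) := Nat.one_le_two_pow
    omega
  simp [hpar]

lemma pv_testBit_hi0 (k b : Nat) : (2 ^ (k + 1) * b).testBit k = false := by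
  have h1 : 2 ^ (k + 1) * b = 2 ^ k * (2 * b) + 0 := by ring
  rw [pv_testBit_decomp _ k _ 0 h1 (by positivity)]
  simp

lemma pv_bitLength (k : Nat) : PySem.Int.bitLength (((2 ^ (k + 1) - 1 : Nat) : Int)) = k + 1 := by
  have h0 : (1:Nat) ≤ 2 ^ (k + 1) := Nat.one_le_two_pow
  set bl := PySem.Int.bitLength (((2 ^ (k + 1) - 1 : Nat) : Int)) with hbl
  have h1 := PySem.Int.lt_two_pow_bitLength (((2 ^ (k + 1) - 1 : Nat) : Int))
  rw [← hbl, Int.natAbs_natCast] at h1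
  have hlow : k + 1 ≤ bl := by
    by_contra hc
    have hble : bl ≤ k := by omega
    have : (2:Nat) ^ bl ≤ 2 ^ k := Nat.pow_le_pow_right (by norm_num) hble
    have h2 : (2:Nat) ^ k < 2 ^ (k + 1) := Nat.pow_lt_pow_right (by norm_num) (by omega)
    have h3 : (2:Nat) ^ k ≤ 2 ^ (k + 1) - 1 := by omega
    omega
  by_cases hz : ((2 ^ (k + 1) - 1 : Nat) : Int) = 0
  · exfalso
    have : (2:Nat) ^ (k + 1) - 1 = 0 := by exact_mod_cast hz
    have h2 : (2:Nat) ^ k < 2 ^ (k + 1) := Nat.pow_lt_pow_right (by norm_num) (by omega)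
    have h4 : (1:Nat) ≤ 2 ^ k := Nat.one_le_two_pow
    omega
  · have h2 := PySem.Int.two_pow_bitLength_le _ hz
    rw [← hbl, Int.natAbs_natCast] at h2
    have hhi : bl - 1 < k + 1 := by
      by_contra hc
      have : (2:Nat) ^ (k + 1) ≤ 2 ^ (bl - 1) := Nat.pow_le_pow_right (by norm_num) (by omega)
      omega
    omega

lemma pv_chain (adj : List (List (Int × Int))) (Nn : Nat)
    (hP : ∀ u ∈ List.range (min Nn adj.length), ∀ vw ∈ adj.getD u [], 0 ≤ vw.1)
    (k b : Nat) (ht : 2 ^ (k + 1) * b + 2 ^ k < 2 ^ Nn)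
    (j : Nat) (hj : j ≤ k) :
    (PySem.List.pyRange 0 (j : Int) 1).foldl
      (fun p u => pvToggle adj (pvRev adj ((min Nn adj.length : Nat) : Int)) p.1 p.2 u)
      (((2 ^ (k + 1) * b + 2 ^ k - 1 : Nat) : Int), pvW adj (2 ^ (k + 1) * b + 2 ^ k - 1))
    = (((2 ^ (k + 1) * b + 2 ^ k - 2 ^ j : Nat) : Int),
        pvW adj (2 ^ (k + 1) * b + 2 ^ k - 2 ^ j)) := by
  have hk1 : (1:Nat) ≤ 2 ^ k := Nat.one_le_two_pow
  induction j with
  | zero =>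
    rw [PySem.List.pyRange_one_eq_nil (by norm_num)]
    simp
  | succ j ih =>
    have hjk : j < k := by omega
    have hjk2 : 2 ^ (j + 1) ≤ 2 ^ k := Nat.pow_le_pow_right (by norm_num) (by omega)
    have hj2 : 2 ^ (j + 1) = 2 * 2 ^ j := by ring
    have hsplit : PySem.List.pyRange 0 ((j + 1 : Nat) : Int) 1
        = PySem.List.pyRange 0 (j : Int) 1 ++ [(j : Int)] := by
      rw [show ((j + 1 : Nat) : Int) = (j : Int) + 1 from by push_cast; ring]
      exact PySem.List.pyRange_one_succ_right (by positivity)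
    rw [hsplit, List.foldl_append, ih (by omega), List.foldl_cons, List.foldl_nil]
    have hbit : (2 ^ (k + 1) * b + 2 ^ k - 2 ^ j).testBit j = true := pv_testBit_mid k b j hjk
    have hs : 2 ^ (k + 1) * b + 2 ^ k - 2 ^ j < 2 ^ Nn := by omega
    rw [pvToggle_remove adj Nn _ j _ hs hP hbit]
    rw [show 2 ^ (k + 1) * b + 2 ^ k - 2 ^ j - 2 ^ j = 2 ^ (k + 1) * b + 2 ^ k - 2 ^ (j + 1) from by omega]
    simp

lemma pv_pow_lt (κ c Nn : Nat) (h1 : 2 ^ κ ≤ c) (h2 : c < 2 ^ Nn) : κ < Nn := by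
  by_contra hc
  have : (2:Nat) ^ Nn ≤ 2 ^ κ := Nat.pow_le_pow_right (by norm_num) (by omega)
  omega

lemma pv_stepB (adj : List (List (Int × Int))) (Nn c : Nat)
    (hP : ∀ u ∈ List.range (min Nn adj.length), ∀ vw ∈ adj.getD u [], 0 ≤ vw.1)
    (hc1 : 1 ≤ c) (hc2 : c < 2 ^ Nn) :
    (let rev := pvRev adj ((min Nn adj.length : Nat) : Int)
     let k : Int := (PySem.Int.bitLength (PySem.Int.bxor (c : Int) ((c : Int) - 1)) : Int) - 1
     let mw1 := (PySem.List.pyRange 0 k 1).foldl (fun p j => pvToggle adj rev p.1 p.2 j)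
         (((c - 1 : Nat) : Int), pvW adj (c - 1))
     pvToggle adj rev mw1.1 mw1.2 k) = (((c : Nat) : Int), pvW adj c) := by
  obtain ⟨κ, b, hcb⟩ := pv_ctz_ex c hc1
  have hk1 : (1:Nat) ≤ 2 ^ κ := Nat.one_le_two_pow
  have hκNn : κ < Nn := pv_pow_lt κ c Nn (by omega) hc2
  have hxor : PySem.Int.bxor (c : Int) ((c : Int) - 1) = ((2 ^ (κ + 1) - 1 : Nat) : Int) := by
    rw [show ((c : Int) - 1) = ((c - 1 : Nat) : Int) from by push_cast [hc1]; ring]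
    rw [PySem.Int.bxor_natCast]
    congr 1
    rw [hcb, pv_xor_tm1]
  have hkval : (PySem.Int.bitLength (PySem.Int.bxor (c : Int) ((c : Int) - 1)) : Int) - 1 = ((κ : Nat) : Int) := by
    rw [hxor, pv_bitLength]
    push_cast
    ring
  simp only [hkval]
  have hchain := pv_chain adj Nn hP κ b (by omega) κ (le_refl κ)
  rw [show (c - 1 : Nat) = 2 ^ (κ + 1) * b + 2 ^ κ - 1 from by omega] at *
  rw [hchain]
  have hrem : 2 ^ (κ + 1) * b + 2 ^ κ - 2 ^ κ = 2 ^ (κ + 1) * b := by omega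
  rw [hrem]
  have hbit0 : (2 ^ (κ + 1) * b).testBit κ = false := pv_testBit_hi0 κ b
  have hs : 2 ^ (κ + 1) * b < 2 ^ Nn := by omega
  rw [pvToggle_insert adj Nn (2 ^ (κ + 1) * b) κ _ hs hP hbit0]
  rw [show 2 ^ (κ + 1) * b + 2 ^ κ = c from by omega]
  simp

lemma pvW_zero (adj : List (List (Int × Int))) : pvW adj 0 = 0 := by
  simp [pvW, Nat.zero_testBit]

lemma pv_main (adj : List (List (Int × Int))) (Nn : Nat)
    (hP : ∀ u ∈ List.range (min Nn adj.length), ∀ vw ∈ adj.getD u [], 0 ≤ vw.1)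
    (c : Nat) (hc1 : 1 ≤ c) (hc2 : c ≤ 2 ^ Nn) :
    ((PySem.List.pyRange 1 (c : Int) 1).foldl (fun st m =>
        let k := (PySem.Int.bitLength (PySem.Int.bxor m (m - 1)) : Int) - 1
        let mw1 := (PySem.List.pyRange 0 k 1).foldl
          (fun p j => pvToggle adj (pvRev adj ((min Nn adj.length : Nat) : Int)) p.1 p.2 j) st.1
        let p := pvToggle adj (pvRev adj ((min Nn adj.length : Nat) : Int)) mw1.1 mw1.2 k
        if p.2 > st.2.1 then (p, (p.2, m)) else (p, st.2))
        ((((0:Int)),((0:Int))),(((0:Int)),((0:Int)))))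
      = ((((c - 1 : Nat) : Int), pvW adj (c - 1)),
         (PySem.List.pyRange 1 (c : Int) 1).foldl (fun st bitmask =>
            let weight := calculate_edge_weight_with_bitmask adj bitmask
            if weight > st.1 then (weight, bitmask) else st) (((0:Int)),((0:Int)))) := by
  induction c, hc1 using Nat.le_induction with
  | base =>
    rw [show ((1 : Nat) : Int) = 1 from rfl, PySem.List.pyRange_one_eq_nil (by norm_num)]
    simp [pvW_zero]
  | succ c hc ih =>
    have hsplit : PySem.List.pyRange 1 ((c + 1 : Nat) : Int) 1
        = PySem.List.pyRange 1 (c : Int) 1 ++ [(c : Int)] := by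
      rw [show ((c + 1 : Nat) : Int) = (c : Int) + 1 from by push_cast; ring]
      exact PySem.List.pyRange_one_succ_right (by exact_mod_cast hc)
    rw [hsplit, List.foldl_append, List.foldl_append, ih (by omega), List.foldl_cons,
      List.foldl_nil, List.foldl_cons, List.foldl_nil]
    have hstep := pv_stepB adj Nn c hP hc (by omega)
    simp only at hstep ⊢
    rw [hstep, calcA_eq adj c]
    rw [show (c + 1 : Nat) - 1 = c from by omega]
    split_ifs with h <;> rfl

-- ===== VERDICT =====
theorem find_max_weight_distribution_with_bitmask_spec : Claim_equal_find_max_weight_distribution_with_bitmask := by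
  intro N adj hdom hpre
  obtain ⟨hN0, hPpre⟩ := hpre
  obtain ⟨Nn, rfl⟩ : ∃ n : Nat, N = (n : Int) := ⟨N.toNat, by omega⟩
  have hmin : min ((Nn : Int)) ((adj.length : Int)) = ((min Nn adj.length : Nat) : Int) := by
    push_cast
    rfl
  have hP : ∀ u ∈ List.range (min Nn adj.length), ∀ vw ∈ adj.getD u [], 0 ≤ vw.1 := by
    rw [show (min ((Nn : Int)) ((adj.length : Int))).toNat = min Nn adj.length from by
      rw [hmin, Int.toNat_natCast]] at hPpre
    exact hPpre
  unfold Spec_find_max_weight_distribution_with_bitmask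
  unfold find_max_weight_distribution_with_bitmask find_max_weight_distribution_with_bitmask_alt
  simp only [hmin]
  rw [show pvShl ((Nn : Nat) : Int) = ((2 ^ Nn : Nat) : Int) from pvPow_natCast Nn]
  rw [show pvPow ((Nn : Nat) : Int) = ((2 ^ Nn : Nat) : Int) from pvPow_natCast Nn]
  rw [pv_main adj Nn hP (2 ^ Nn) Nat.one_le_two_pow (le_refl _)]
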